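-- pv_equiv track=rewrite | github.com/kreeedit/trace | trace.py | shingle_text
-- ===== SOURCE A (Python) =====
-- def shingle_text(text, s=5, mode="word"):
--   """Converts a text into a list of shingles.
--
--   A shingle is a contiguous subsequence of tokens (words or characters) in the text.
--   This function supports both word and character shingles.
--
--   Args:
--     text: The input text string.
--     s: The size of each shingle (number of words or characters). Defaults to 5.
--     mode: The type of shingle to generate. Can be either 'word' or 'character'.
--           Defaults to 'word'.
--
--   Returns:
--     A list of shingles extracted from the text.
--
--   Raises:
--     ValueError: If an invalid mode is provided.
--   """
--   if mode == "word":
--     words = text.split()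
--     return [" ".join(words[i : i + s]) for i in range(len(words) - s + 1)]
--   elif mode == "character":
--     return [text[i : i + s] for i in range(len(text) - s + 1)]
--   else:
--     raise ValueError("Invalid mode. Choose either 'word' or 'character'.")
-- ===== SOURCE B (Python) =====
-- def shingle_text(text, s=5, mode="word"):
--     """Sliding-window re-implementation: one forward pass over the tokens,
--     emitting the joined window each time it fills, instead of re-slicing by index."""
--     if mode == "word":
--         tokens = text.split()
--         sep = " "
--     elif mode == "character":
--         tokens = list(text)
--         sep = ""
--     else:
--         raise ValueError("Invalid mode. Choose either 'word' or 'character'.")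
--     out = []
--     window = []
--     for tok in tokens:
--         window.append(tok)
--         if len(window) == s:
--             out.append(sep.join(window))
--             window.pop(0)
--     return out
-- ===== Notes on version B (the rewrite author's own statement) =====
-- stated objective: alternative
-- what changed: Replaces A's index/range re-slicing (a fresh slice per start position) with a single forward pass that maintains a sliding window of tokens, emitting the joined window each time it fills; both modes share one token-list loop.
-- outside the precondition, e.g. on shingle_text('ab cd', 0, 'word'): A returns ['', '', ''], B returns []; on shingle_text('abc', -1, 'character'): A returns ['ab', '', '', '', ''], B returns []; on shingle_text('ab', 2, 'lines'): A raises ValueError, B raises ValueError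
import Mathlib
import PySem

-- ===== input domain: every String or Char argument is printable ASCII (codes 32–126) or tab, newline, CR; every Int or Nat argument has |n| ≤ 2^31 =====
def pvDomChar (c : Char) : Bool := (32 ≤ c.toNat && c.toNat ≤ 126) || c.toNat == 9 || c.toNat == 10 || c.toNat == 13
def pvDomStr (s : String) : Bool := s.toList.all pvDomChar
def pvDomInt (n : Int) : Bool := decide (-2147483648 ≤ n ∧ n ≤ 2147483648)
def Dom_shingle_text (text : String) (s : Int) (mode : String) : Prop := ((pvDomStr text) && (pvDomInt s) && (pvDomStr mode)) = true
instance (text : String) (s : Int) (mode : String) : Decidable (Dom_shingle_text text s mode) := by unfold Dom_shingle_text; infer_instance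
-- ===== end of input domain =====

-- B replaces A's index/range re-slicing with a single forward pass that maintains a
-- sliding window of tokens, emitting the joined window each time it fills (objective:
-- alternative decomposition, same cost).

-- ===== PORT A =====
def shingle_text (text : String) (s : Int) (mode : String) : List String :=
  if mode == "word" then
    let words := PySem.Str.split₀ text
    (PySem.List.pyRange 0 ((words.length : Int) - s + 1)).map
      (fun i => PySem.Str.join " " (PySem.List.slice words (some i) (some (i + s))))
  else if mode == "character" then
    (PySem.List.pyRange 0 (PySem.Str.len text - s + 1)).map
      (fun i => PySem.Str.slice text (some i) (some (i + s)))
  else []  -- raise ValueError: excluded by Pre_shingle_text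

-- ===== PORT B =====
-- the single-pass loop of Source B: append the token, and when the window reaches size s
-- emit the joined window and pop its front (window.pop(0) = drop 1)
def shingle_loop (tokens : List String) (sep : String) (s : Int) : List String :=
  (tokens.foldl
    (fun (st : List String × List String) tok =>
      let window := st.2 ++ [tok]
      if (window.length : Int) == s then
        (st.1 ++ [PySem.Str.join sep window], window.drop 1)
      else
        (st.1, window))
    ([], [])).1

def shingle_text_alt (text : String) (s : Int) (mode : String) : List String :=
  if mode == "word" then
    shingle_loop (PySem.Str.split₀ text) " " s
  else if mode == "character" then
    shingle_loop (text.toList.map (fun c => String.ofList [c])) "" s  -- list(text)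
  else []  -- raise ValueError: excluded by Pre_shingle_text

-- ===== PRECONDITION & SPEC =====
-- Pre_ excludes the modes other than "word"/"character", on which A raises ValueError, and
-- non-positive shingle sizes s <= 0, a corner no caller would specify, on which A's value
-- (len(tokens)-s+1 empty strings or accidental negative-slice fragments) and B's [] are both
-- unspecified behaviour.
def Pre_shingle_text (text : String) (s : Int) (mode : String) : Prop :=
  (mode = "word" ∨ mode = "character") ∧ 1 ≤ s
instance (text : String) (s : Int) (mode : String) : Decidable (Pre_shingle_text text s mode) := by
  unfold Pre_shingle_text; infer_instance
def pvWitness_shingle_text : String × Int × String := ("a b c", 2, "word")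

def Spec_shingle_text (text : String) (s : Int) (mode : String) (out : List String) : Prop :=
  out = shingle_text_alt text s mode
instance (text : String) (s : Int) (mode : String) (out : List String) : Decidable (Spec_shingle_text text s mode out) := by
  unfold Spec_shingle_text; infer_instance

-- ===== CLAIM (what is proved, stated in full; the proofs are below) =====
def Claim_equal_shingle_text : Prop := ∀ (text : String) (s : Int) (mode : String), Dom_shingle_text text s mode → Pre_shingle_text text s mode → Spec_shingle_text text s mode (shingle_text text s mode)

-- ===== LEMMAS AND PROOFS =====

-- the list of all size-k shingles of l, by start index (A's view, in Nat form)
def pvShingles (sep : String) (k : Nat) (l : List String) : List String :=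
  (List.range (l.length + 1 - k)).map (fun i => PySem.Str.join sep (List.take k (List.drop i l)))

theorem pvShingles_nil_of_short (sep : String) (k : Nat) (l : List String)
    (h : l.length < k) : pvShingles sep k l = [] := by
  unfold pvShingles
  have : l.length + 1 - k = 0 := by omega
  simp [this]

theorem pvShingles_cons (sep : String) (k : Nat) (hk : 1 ≤ k) (l : List String)
    (hl : k ≤ l.length) :
    pvShingles sep k l
      = PySem.Str.join sep (List.take k l) :: pvShingles sep k (List.drop 1 l) := by
  unfold pvShingles
  have h1 : l.length + 1 - k = (l.length - k) + 1 := by omega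
  have h2 : (List.drop 1 l).length + 1 - k = l.length - k := by
    simp [List.length_drop]; omega
  rw [h1, h2, List.range_succ_eq_map, List.map_cons, List.map_map]
  simp only [List.drop_zero]
  congr 1
  apply List.map_congr_left
  intro j _
  simp [Nat.succ_eq_add_one, List.drop_drop, Nat.add_comm]

-- the loop body of shingle_loop, named for the proofs
def pvStep (sep : String) (s : Int) (st : List String × List String) (tok : String) :
    List String × List String :=
  let window := st.2 ++ [tok]
  if (window.length : Int) == s then
    (st.1 ++ [PySem.Str.join sep window], window.drop 1)
  else
    (st.1, window)

theorem shingle_loop_eq_foldl (tokens : List String) (sep : String) (s : Int) :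
    shingle_loop tokens sep s = (tokens.foldl (pvStep sep s) ([], [])).1 := rfl

theorem pvStep_pos (sep : String) (s : Int) (acc w : List String) (t : String)
    (h : ((w ++ [t]).length : Int) = s) :
    pvStep sep s (acc, w) t = (acc ++ [PySem.Str.join sep (w ++ [t])], (w ++ [t]).drop 1) := by
  have h' : ((w.length : Int) + 1) = s := by simpa using h
  unfold pvStep
  simp [h']

theorem pvStep_neg (sep : String) (s : Int) (acc w : List String) (t : String)
    (h : ((w ++ [t]).length : Int) ≠ s) :
    pvStep sep s (acc, w) t = (acc, w ++ [t]) := by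
  have h' : ¬ ((w.length : Int) + 1 = s) := by simpa using h
  unfold pvStep
  simp [h']

-- loop invariant: starting from a window shorter than k, the loop appends exactly
-- the shingles of (window ++ remaining tokens)
theorem shingle_loop_inv (sep : String) (k : Nat) (hk : 1 ≤ k) :
    ∀ (ts : List String) (acc w : List String), w.length + 1 ≤ k →
      (ts.foldl (pvStep sep (k : Int)) (acc, w)).1 = acc ++ pvShingles sep k (w ++ ts) := by
  intro ts
  induction ts with
  | nil =>
      intro acc w hw
      simp [pvShingles_nil_of_short sep k w (by omega)]
  | cons t ts ih =>
      intro acc w hw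
      rw [List.foldl_cons]
      by_cases hlen : w.length + 1 = k
      · rw [pvStep_pos sep (k : Int) acc w t (by
          simp only [List.length_append, List.length_cons, List.length_nil]
          omega)]
        rw [ih (acc ++ [PySem.Str.join sep (w ++ [t])]) ((w ++ [t]).drop 1) (by simp; omega)]
        have hassoc : w ++ t :: ts = (w ++ [t]) ++ ts := by simp
        rw [hassoc, pvShingles_cons sep k hk ((w ++ [t]) ++ ts) (by simp; omega)]
        have htake : List.take k ((w ++ [t]) ++ ts) = w ++ [t] := by
          rw [List.take_append_of_le_length (by simp; omega)]
          exact List.take_of_length_le (by simp; omega)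
        have hdrop : List.drop 1 ((w ++ [t]) ++ ts) = (w ++ [t]).drop 1 ++ ts :=
          List.drop_append_of_le_length (by simp)
        rw [htake, hdrop]
        simp
      · rw [pvStep_neg sep (k : Int) acc w t (by
          intro h
          have : (w ++ [t]).length = k := by exact_mod_cast h
          simp at this; omega)]
        rw [ih acc (w ++ [t]) (by simp; omega)]
        simp

theorem shingle_loop_eq (sep : String) (k : Nat) (hk : 1 ≤ k) (tokens : List String) :
    shingle_loop tokens sep (k : Int) = pvShingles sep k tokens := by
  rw [shingle_loop_eq_foldl]
  simpa using shingle_loop_inv sep k hk tokens [] [] (by simpa using hk)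

-- A's word-mode comprehension as pvShingles
theorem map_pyRange_eq_range (L k : Nat) (f : Int → String) (g : Nat → String)
    (hf : ∀ j : Nat, j < L + 1 - k → f ((0 : Int) + (j : Int)) = g j) :
    (PySem.List.pyRange 0 ((L : Int) - (k : Int) + 1)).map f
      = (List.range (L + 1 - k)).map g := by
  rw [PySem.List.pyRange_one, List.map_map]
  have hn : (((L : Int) - (k : Int) + 1) - 0).toNat = L + 1 - k := by omega
  rw [hn]
  apply List.map_congr_left
  intro j hj
  exact hf j (List.mem_range.mp hj)

theorem A_word_eq (words : List String) (k : Nat) :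
    (PySem.List.pyRange 0 ((words.length : Int) - (k : Int) + 1)).map
      (fun i => PySem.Str.join " " (PySem.List.slice words (some i) (some (i + (k : Int)))))
      = pvShingles " " k words := by
  unfold pvShingles
  apply map_pyRange_eq_range
  intro j _
  rw [zero_add, PySem.List.slice_natCast_add]

theorem join_nil_singletons_str (l : List Char) :
    PySem.Str.join "" (l.map (fun c => String.ofList [c])) = String.ofList l := by
  apply String.toList_inj.mp
  rw [PySem.Str.toList_join]
  simp only [List.map_map]
  have h1 : (List.map (String.toList ∘ fun c => String.ofList [c]) l) = l.map (fun c => [c]) := by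
    apply List.map_congr_left; intro c _; simp
  have h0 : ("" : String).toList = ([] : List Char) := rfl
  rw [h1, h0, PySem.Chars.join_nil_singletons]
  simp

theorem A_char_eq (text : String) (k : Nat) :
    (PySem.List.pyRange 0 (PySem.Str.len text - (k : Int) + 1)).map
      (fun i => PySem.Str.slice text (some i) (some (i + (k : Int))))
      = pvShingles "" k (text.toList.map (fun c => String.ofList [c])) := by
  have hlen : PySem.Str.len text = (text.toList.length : Int) := by
    simp [pysem]
  rw [hlen]
  unfold pvShingles
  rw [List.length_map]
  apply map_pyRange_eq_range
  intro j _
  rw [zero_add]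
  apply String.toList_inj.mp
  have hslice : (PySem.Str.slice text (some (j : Int)) (some ((j : Int) + (k : Int)))).toList
      = List.take k (List.drop j text.toList) := by
    rw [PySem.Str.toList_slice, PySem.Chars.slice_eq_listSlice, PySem.List.slice_natCast_add]
  have hmaps : List.take k (List.drop j (text.toList.map (fun c => String.ofList [c])))
      = (List.take k (List.drop j text.toList)).map (fun c => String.ofList [c]) := by
    simp
  rw [hslice, hmaps, join_nil_singletons_str]
  simp

-- ===== VERDICT (by name: the statement is the Claim_ definition above) =====
theorem shingle_text_spec : Claim_equal_shingle_text := by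
  intro text s mode _ hpre
  unfold Spec_shingle_text
  obtain ⟨hmode, hs⟩ := hpre
  set k := s.toNat with hkdef
  have hsk : s = (k : Int) := by omega
  have hk1 : 1 ≤ k := by omega
  rcases hmode with h | h
  · subst h
    unfold shingle_text shingle_text_alt
    simp only [beq_self_eq_true, if_pos]
    rw [hsk, A_word_eq, shingle_loop_eq _ k hk1]
  · subst h
    unfold shingle_text shingle_text_alt
    have hne : (("character" : String) == "word") = false := by decide
    simp only [hne, Bool.false_eq_true, if_false, beq_self_eq_true, if_pos]
    rw [hsk, A_char_eq, shingle_loop_eq _ k hk1]
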